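-- pv_equiv track=rewrite | github.com/ashnet16/project_euler_solutions | project_euler.py | adjacent_product_helper_down_up
-- ===== SOURCE A (Python) =====
-- def adjacent_product_helper_down_up(grid: list, limit: int, row: int):
--     max_product = 0
--     column = 0
--     row_num = row
--     while row_num >= row - (row - limit + 1):
--         b_row = row_num - 1
--         b_column = column + 1
--         count = 0
--         inner_product = grid[row_num][column]
--         while count < limit - 1:
--             inner_product *= grid[b_row][b_column]
--             count += 1
--             b_row -= 1
--             b_column += 1
--         row_num -= 1
--         column += 1
--         if inner_product > max_product:
--             max_product = inner_product
--
--     return max_product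
-- ===== SOURCE B (Python) =====
-- def adjacent_product_helper_down_up(grid: list, limit: int, row: int):
--     # Rolling-window pass along the anti-diagonal r+c=row: maintain the product
--     # of the window's nonzero entries plus a zero counter, updating by one
--     # multiply and one exact division per step instead of recomputing each
--     # limit-length product from scratch.
--     if row - limit + 1 < 0:
--         return 0
--     diag = [grid[row - i][i] for i in range(row + 1)]
--     best = 0
--     prod_nz = 1
--     zeros = 0
--     for i in range(len(diag)):
--         x = diag[i]
--         if x == 0:
--             zeros += 1
--         else:
--             prod_nz *= x
--         if i >= limit:
--             y = diag[i - limit]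
--             if y == 0:
--                 zeros -= 1
--             else:
--                 prod_nz //= y
--         if i >= limit - 1:
--             p = 0 if zeros else prod_nz
--             if p > best:
--                 best = p
--     return best
-- ===== Notes on version B (the rewrite author's own statement) =====
-- stated objective: alternative
-- what changed: Replaces A's nested loops (each limit-length anti-diagonal product recomputed from scratch) by a single rolling-window pass over the materialized diagonal that maintains the product of the window's nonzero entries plus a zero counter, updating with one multiply and one exact division per step.
-- outside the precondition, e.g. on adjacent_product_helper_down_up([[1, 2], [3, 4]], 0, 0): A returns 4, B returns 1
import Mathlib
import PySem

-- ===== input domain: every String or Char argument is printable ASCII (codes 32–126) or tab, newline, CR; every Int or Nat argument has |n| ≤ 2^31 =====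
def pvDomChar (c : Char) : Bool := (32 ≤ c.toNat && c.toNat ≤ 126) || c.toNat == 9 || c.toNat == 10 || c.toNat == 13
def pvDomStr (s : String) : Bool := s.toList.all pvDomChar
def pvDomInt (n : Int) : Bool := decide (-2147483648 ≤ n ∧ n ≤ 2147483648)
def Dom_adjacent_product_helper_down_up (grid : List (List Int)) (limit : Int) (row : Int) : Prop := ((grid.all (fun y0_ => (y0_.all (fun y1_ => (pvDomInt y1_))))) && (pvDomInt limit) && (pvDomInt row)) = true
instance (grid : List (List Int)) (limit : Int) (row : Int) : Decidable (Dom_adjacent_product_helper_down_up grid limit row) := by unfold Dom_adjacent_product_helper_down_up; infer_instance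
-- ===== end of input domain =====

-- B replaces A's nested loops (each window product recomputed from scratch) by one rolling-window
-- pass over the materialized anti-diagonal: product of the window's nonzero entries plus a zero
-- counter, updated by one multiply and one exact division per step (objective: alternative).

-- ===== PORT A =====
-- grid[r][c]; exact wherever the Python access returns (guaranteed inside Pre_)
def pvIdx2 (grid : List (List Int)) (r c : Int) : Int :=
  PySem.List.pyGetD (PySem.List.pyGetD grid r []) c 0

-- the inner 'while count < limit - 1' loop; the fuel is exactly the number of iterations left
def pvInnerGo (grid : List (List Int)) (limit : Int) :
    Nat → Int → Int → Int → Int → Int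
  | 0, _, _, _, inner_product => inner_product
  | fuel + 1, count, b_row, b_column, inner_product =>
    if count < limit - 1 then
      pvInnerGo grid limit fuel (count + 1) (b_row - 1) (b_column + 1)
        (inner_product * pvIdx2 grid b_row b_column)
    else inner_product

def pvInnerA (grid : List (List Int)) (limit count b_row b_column inner_product : Int) : Int :=
  pvInnerGo grid limit (limit - 1 - count).toNat count b_row b_column inner_product

-- the outer 'while row_num >= row - (row - limit + 1)' loop
def pvOuterGo (grid : List (List Int)) (limit row : Int) :
    Nat → Int → Int → Int → Int
  | 0, _, _, max_product => max_product
  | fuel + 1, row_num, column, max_product =>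
    if row_num ≥ row - (row - limit + 1) then
      let inner_product :=
        pvInnerA grid limit 0 (row_num - 1) (column + 1) (pvIdx2 grid row_num column)
      pvOuterGo grid limit row fuel (row_num - 1) (column + 1)
        (if inner_product > max_product then inner_product else max_product)
    else max_product

def adjacent_product_helper_down_up (grid : List (List Int)) (limit : Int) (row : Int) : Int :=
  pvOuterGo grid limit row (row - (row - (row - limit + 1)) + 1).toNat row 0 0

-- ===== PORT B =====
-- diag = [grid[row - i][i] for i in range(row + 1)]
def pvDiag (grid : List (List Int)) (row : Int) : List Int :=
  (PySem.List.pyRange 0 (row + 1) 1).map (fun i => pvIdx2 grid (row - i) i)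

-- one iteration of Source B's for-loop; state = (best, prod_nz, zeros)
def pvStepB (limit : Int) (diag : List Int) (st : Int × Int × Int) (i : Int) : Int × Int × Int :=
  let x := PySem.List.pyGetD diag i 0
  let pz1 : Int × Int := if x = 0 then (st.2.1, st.2.2 + 1) else (st.2.1 * x, st.2.2)
  let pz2 : Int × Int :=
    if limit ≤ i then
      let y := PySem.List.pyGetD diag (i - limit) 0
      if y = 0 then (pz1.1, pz1.2 - 1) else (PySem.Int.floordiv pz1.1 y, pz1.2)
    else pz1
  let best :=
    if limit - 1 ≤ i then
      let p := if pz2.2 ≠ 0 then 0 else pz2.1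
      if p > st.1 then p else st.1
    else st.1
  (best, pz2)

def adjacent_product_helper_down_up_alt (grid : List (List Int)) (limit : Int) (row : Int) : Int :=
  if row - limit + 1 < 0 then 0
  else
    let diag := pvDiag grid row
    ((PySem.List.pyRange 0 (diag.length : Int) 1).foldl (pvStepB limit diag) (0, 1, 0)).1

-- ===== PRECONDITION & SPEC =====
-- Pre_ excludes (a) limit ≤ 0 — a nonpositive window length, outside the task's natural
-- domain (there A's outer loop runs past row 0 into indices Python resolves from the end,
-- raising IndexError or returning an accidental value) — and (b) inputs where A's grid
-- accesses raise IndexError.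
def Pre_adjacent_product_helper_down_up (grid : List (List Int)) (limit : Int) (row : Int) : Prop :=
  1 ≤ limit ∧ (limit - 1 ≤ row →
    0 ≤ row ∧ row < (grid.length : Int) ∧
    ∀ i < (row + 1).toNat, row - (i : Int) < ((grid.getD i []).length : Int))
instance (grid : List (List Int)) (limit : Int) (row : Int) : Decidable (Pre_adjacent_product_helper_down_up grid limit row) := by unfold Pre_adjacent_product_helper_down_up; infer_instance

def pvWitness_adjacent_product_helper_down_up : List (List Int) × Int × Int := ([[1, 2], [3, 4]], 1, 1)

def Spec_adjacent_product_helper_down_up (grid : List (List Int)) (limit : Int) (row : Int) (out : Int) : Prop := out = adjacent_product_helper_down_up_alt grid limit row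
instance (grid : List (List Int)) (limit : Int) (row : Int) (out : Int) : Decidable (Spec_adjacent_product_helper_down_up grid limit row out) := by unfold Spec_adjacent_product_helper_down_up; infer_instance

-- ===== CLAIM (what is proved, stated in full; the proofs are below) =====
def Claim_equal_adjacent_product_helper_down_up : Prop := ∀ (grid : List (List Int)) (limit : Int) (row : Int), Dom_adjacent_product_helper_down_up grid limit row → Pre_adjacent_product_helper_down_up grid limit row → Spec_adjacent_product_helper_down_up grid limit row (adjacent_product_helper_down_up grid limit row)

-- ===== LEMMAS AND PROOFS =====

-- the product of k anti-diagonal cells starting at (r, c), going up-right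
def pvProdK (grid : List (List Int)) : Nat → Int → Int → Int
  | 0, _, _ => 1
  | k + 1, r, c => pvIdx2 grid r c * pvProdK grid k (r - 1) (c + 1)

theorem pvInnerA_eq (grid : List (List Int)) (limit : Int) :
    ∀ (k : Nat) (count b_row b_column acc : Int), (limit - 1 - count).toNat = k →
      pvInnerGo grid limit k count b_row b_column acc = acc * pvProdK grid k b_row b_column := by
  intro k
  induction k with
  | zero =>
    intro count b_row b_column acc h
    simp [pvInnerGo, pvProdK]
  | succ k ih =>
    intro count b_row b_column acc h
    rw [pvInnerGo, if_pos (by omega)]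
    rw [ih (count + 1) _ _ _ (by omega)]
    simp [pvProdK]; ring

theorem pvOuterGo_eq (grid : List (List Int)) (limit row : Int) (hl : 1 ≤ limit) :
    ∀ (n : Nat) (rn c m : Int), rn = limit - 1 + (n : Int) → c = row - rn →
      pvOuterGo grid limit row (n + 1) rn c m
        = (PySem.List.pyRange c (row - limit + 2) 1).foldl
            (fun best j =>
              if pvProdK grid limit.toNat (row - j) j > best
              then pvProdK grid limit.toNat (row - j) j else best) m := by
  intro n
  induction n with
  | zero =>
    intro rn c m hrn hc
    rw [pvOuterGo, if_pos (by omega)]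
    simp only [pvInnerA, sub_zero]
    rw [pvInnerA_eq grid limit (limit - 1).toNat 0 _ _ _ (by omega)]
    have hrange : PySem.List.pyRange c (row - limit + 2) 1 = [c] := by
      have h2 : row - limit + 2 = c + 1 := by omega
      rw [h2, PySem.List.pyRange_one_singleton]
    rw [hrange]
    simp only [pvOuterGo, List.foldl_cons, List.foldl_nil]
    have hk : limit.toNat = (limit - 1).toNat + 1 := by omega
    have hrw : row - c = rn := by omega
    rw [hk, hrw]
    simp [pvProdK]
  | succ n ih =>
    intro rn c m hrn hc
    have hcons : PySem.List.pyRange c (row - limit + 2) 1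
        = c :: PySem.List.pyRange (c + 1) (row - limit + 2) 1 :=
      PySem.List.pyRange_one_cons (by omega)
    rw [hcons, List.foldl_cons]
    rw [pvOuterGo, if_pos (by omega)]
    simp only [pvInnerA, sub_zero]
    rw [pvInnerA_eq grid limit (limit - 1).toNat 0 _ _ _ (by omega)]
    rw [ih (rn - 1) (c + 1) _ (by omega) (by omega)]
    congr 1
    have hk : limit.toNat = (limit - 1).toNat + 1 := by omega
    have hrc : row - c = rn := by omega
    rw [hk, hrc]
    simp [pvProdK]

-- ---- B-side invariant machinery ----

-- window of the last (at most L) of the first i diagonal entries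
def pvWin (diag : List Int) (L i : Nat) : List Int := (diag.take i).drop (i - L)
-- product of the nonzero entries of the window
def pvPnz (W : List Int) : Int := (W.filter (fun x => x ≠ 0)).prod
-- count of zeros in the window, as Int
def pvZc (W : List Int) : Int := (W.count 0 : Int)
-- best over all complete windows among the first i entries
def pvBst (grid : List (List Int)) (limit row i : Int) : Int :=
  (PySem.List.pyRange 0 (i - limit + 1) 1).foldl
    (fun best j =>
      if pvProdK grid limit.toNat (row - j) j > best
      then pvProdK grid limit.toNat (row - j) j else best) 0

theorem pvDiag_length (grid : List (List Int)) (row : Int) :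
    (pvDiag grid row).length = (row + 1).toNat := by
  simp [pvDiag, PySem.List.length_pyRange_one]

theorem pvDiag_getElem (grid : List (List Int)) (row : Int) (k : Nat)
    (h : k < (pvDiag grid row).length) :
    (pvDiag grid row)[k] = pvIdx2 grid (row - (k : Int)) (k : Int) := by
  simp only [pvDiag, List.getElem_map]
  rw [PySem.List.getElem_pyRange_one]
  simp

-- full-window product: (diag.drop j).take k multiplies to pvProdK k (row - j) j
theorem pvWindowProd (grid : List (List Int)) (row : Int) :
    ∀ (k j : Nat), j + k ≤ (pvDiag grid row).length →
      (((pvDiag grid row).drop j).take k).prod = pvProdK grid k (row - (j : Int)) (j : Int) := by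
  intro k
  induction k with
  | zero => intro j h; simp [pvProdK]
  | succ k ih =>
    intro j h
    have hj : j < (pvDiag grid row).length := by omega
    rw [List.drop_eq_getElem_cons hj, List.take_succ_cons, List.prod_cons,
        pvDiag_getElem grid row j hj, ih (j + 1) (by omega), pvProdK]
    rw [show (((j + 1 : Nat)) : Int) = (j : Int) + 1 from by push_cast; ring,
        show row - ((j : Int) + 1) = row - (j : Int) - 1 from by ring]

-- 'p = 0 if zeros else prod_nz' is exactly the window's product
theorem pvPnz_prod (W : List Int) :
    (if pvZc W ≠ 0 then (0 : Int) else pvPnz W) = W.prod := by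
  by_cases hz : (0 : Int) ∈ W
  · have hc : 0 < W.count 0 := List.count_pos_iff.mpr hz
    rw [if_pos (by unfold pvZc; omega)]
    exact (List.prod_eq_zero hz).symm
  · rw [if_neg (by simp [pvZc, List.count_eq_zero.mpr hz])]
    unfold pvPnz
    congr 1
    apply List.filter_eq_self.mpr
    intro a ha
    simp only [decide_eq_true_eq]
    intro h0; exact hz (h0 ▸ ha)

-- append/cons behaviour of the nonzero-product and zero-count of a window
theorem pvPnz_append (W : List Int) (x : Int) :
    pvPnz (W ++ [x]) = if x = 0 then pvPnz W else pvPnz W * x := by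
  by_cases hx : x = 0 <;> simp [pvPnz, List.filter_append, hx]

theorem pvZc_append (W : List Int) (x : Int) :
    pvZc (W ++ [x]) = if x = 0 then pvZc W + 1 else pvZc W := by
  by_cases hx : x = 0 <;> simp [pvZc, List.count_append, hx]

theorem pvPnz_cons (y : Int) (W : List Int) :
    pvPnz (y :: W) = if y = 0 then pvPnz W else y * pvPnz W := by
  by_cases hy : y = 0 <;> simp [pvPnz, hy]

theorem pvZc_cons (y : Int) (W : List Int) :
    pvZc (y :: W) = if y = 0 then pvZc W + 1 else pvZc W := by
  by_cases hy : y = 0 <;> simp [pvZc, hy]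

theorem pvWin_push (D : List Int) (L i : Nat) (hi : i < D.length) :
    pvWin D L i ++ [D[i]] = (D.take (i+1)).drop (i - L) := by
  unfold pvWin
  rw [List.take_succ, List.getElem?_eq_getElem hi]
  simp only [Option.toList_some]
  rw [List.drop_append_of_le_length (by simp; omega)]

theorem pvWin_small (D : List Int) (L i : Nat) (hiL : i < L) :
    (D.take (i+1)).drop (i - L) = pvWin D L (i+1) := by
  unfold pvWin
  rw [show i - L = 0 by omega, show i + 1 - L = 0 by omega]

theorem pvWin_cons (D : List Int) (L i : Nat) (hL : 1 ≤ L) (hLi : L ≤ i) (hi : i < D.length) :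
    (D.take (i+1)).drop (i - L) = D[i - L]'(by omega) :: pvWin D L (i+1) := by
  unfold pvWin
  rw [List.drop_eq_getElem_cons (by simp; omega)]
  rw [List.getElem_take]
  rw [show i - L + 1 = i + 1 - L by omega]

theorem pvWin_full_prod (grid : List (List Int)) (row : Int) (L i : Nat)
    (hL : L ≤ i + 1) (hi : i + 1 ≤ (pvDiag grid row).length) :
    (pvWin (pvDiag grid row) L (i+1)).prod
      = pvProdK grid L (row - ((i + 1 - L : Nat) : Int)) ((i + 1 - L : Nat) : Int) := by
  unfold pvWin
  rw [List.drop_take, show i + 1 - (i + 1 - L) = L by omega]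
  exact pvWindowProd grid row L (i + 1 - L) (by omega)

theorem pvBst_nil (grid : List (List Int)) (limit row i : Int) (h : i - limit + 1 ≤ 0) :
    pvBst grid limit row i = 0 := by
  unfold pvBst; rw [PySem.List.pyRange_one_eq_nil (by omega)]; rfl

theorem pvBst_succ (grid : List (List Int)) (limit row i : Int) (h : 0 ≤ i - limit + 1) :
    pvBst grid limit row (i + 1)
      = if pvProdK grid limit.toNat (row - (i - limit + 1)) (i - limit + 1) > pvBst grid limit row i
        then pvProdK grid limit.toNat (row - (i - limit + 1)) (i - limit + 1)
        else pvBst grid limit row i := by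
  unfold pvBst
  rw [show i + 1 - limit + 1 = (i - limit + 1) + 1 by ring,
      PySem.List.pyRange_one_succ_right (by omega), List.foldl_append]
  rfl

-- one loop iteration preserves the invariant
theorem pvStepB_spec (grid : List (List Int)) (limit row : Int) (hl : 1 ≤ limit)
    (i : Nat) (hi : i < (pvDiag grid row).length) :
    pvStepB limit (pvDiag grid row)
        (pvBst grid limit row (i : Int),
         pvPnz (pvWin (pvDiag grid row) limit.toNat i),
         pvZc (pvWin (pvDiag grid row) limit.toNat i)) (i : Int)
      = (pvBst grid limit row ((i : Int) + 1),
         pvPnz (pvWin (pvDiag grid row) limit.toNat (i + 1)),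
         pvZc (pvWin (pvDiag grid row) limit.toNat (i + 1))) := by
  have hL1 : 1 ≤ limit.toNat := by omega
  have hx : PySem.List.pyGetD (pvDiag grid row) ((i : Nat) : Int) 0
      = (pvDiag grid row)[i] := by
    rw [PySem.List.pyGetD_eq_getElem (pvDiag grid row) 0 (by omega) (by exact_mod_cast hi)]
    simp
  have hM : pvWin (pvDiag grid row) limit.toNat i ++ [(pvDiag grid row)[i]]
      = ((pvDiag grid row).take (i+1)).drop (i - limit.toNat) :=
    pvWin_push _ _ _ hi
  -- the 'best' update is the same in both window regimes
  have hbest : (if limit - 1 ≤ ((i : Nat) : Int) then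
        (if (if pvZc (pvWin (pvDiag grid row) limit.toNat (i+1)) ≠ 0 then (0:Int)
             else pvPnz (pvWin (pvDiag grid row) limit.toNat (i+1))) > pvBst grid limit row ((i : Nat) : Int)
         then (if pvZc (pvWin (pvDiag grid row) limit.toNat (i+1)) ≠ 0 then (0:Int)
               else pvPnz (pvWin (pvDiag grid row) limit.toNat (i+1)))
         else pvBst grid limit row ((i : Nat) : Int))
      else pvBst grid limit row ((i : Nat) : Int)) = pvBst grid limit row (((i : Nat) : Int) + 1) := by
    by_cases hb : limit - 1 ≤ ((i : Nat) : Int)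
    · rw [if_pos hb]
      have hp : (if pvZc (pvWin (pvDiag grid row) limit.toNat (i+1)) ≠ 0 then (0:Int)
            else pvPnz (pvWin (pvDiag grid row) limit.toNat (i+1)))
          = pvProdK grid limit.toNat (row - (((i : Nat) : Int) - limit + 1)) (((i : Nat) : Int) - limit + 1) := by
        rw [pvPnz_prod]
        rw [pvWin_full_prod grid row limit.toNat i (by omega) (by omega)]
        rw [show ((i + 1 - limit.toNat : Nat) : Int) = ((i : Nat) : Int) - limit + 1 by omega]
      rw [hp, pvBst_succ grid limit row ((i : Nat) : Int) (by omega)]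
    · rw [if_neg hb, pvBst_nil grid limit row ((i : Nat) : Int) (by omega),
          pvBst_nil grid limit row (((i : Nat) : Int) + 1) (by omega)]
  by_cases hLi : limit ≤ ((i : Nat) : Int)
  · -- full window slides: the oldest diagonal entry leaves
    have hLiN : limit.toNat ≤ i := by omega
    have hiL : i - limit.toNat < (pvDiag grid row).length := by omega
    have hy : PySem.List.pyGetD (pvDiag grid row) (((i : Nat) : Int) - limit) 0
        = (pvDiag grid row)[i - limit.toNat] := by
      rw [show ((i : Nat) : Int) - limit = ((i - limit.toNat : Nat) : Int) by omega]
      rw [PySem.List.pyGetD_eq_getElem (pvDiag grid row) 0 (by omega) (by exact_mod_cast hiL)]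
      simp
    have hM2 : pvWin (pvDiag grid row) limit.toNat i ++ [(pvDiag grid row)[i]]
        = (pvDiag grid row)[i - limit.toNat] :: pvWin (pvDiag grid row) limit.toNat (i+1) := by
      rw [hM]; exact pvWin_cons _ _ _ hL1 hLiN hi
    unfold pvStepB
    simp only [hx, hy, if_pos hLi, apply_ite (f := fun p : Int × Int => p.1),
      apply_ite (f := fun p : Int × Int => p.2), Prod.mk.injEq]
    refine ⟨?_, ?_⟩
    · rw [← pvPnz_append, ← pvZc_append, hM2, pvPnz_cons, pvZc_cons]
      by_cases hy0 : (pvDiag grid row)[i - limit.toNat] = 0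
      · simp only [if_pos hy0, add_sub_cancel_right]
        exact hbest
      · simp only [if_neg hy0, PySem.Int.floordiv, Int.mul_fdiv_cancel_left _ hy0]
        exact hbest
    · rw [← pvPnz_append, ← pvZc_append, hM2, pvPnz_cons, pvZc_cons]
      split_ifs with hy0
      · simp
      · simp [PySem.Int.floordiv, Int.mul_fdiv_cancel_left _ hy0]
  · -- window still growing: nothing leaves yet
    have hM3 : pvWin (pvDiag grid row) limit.toNat i ++ [(pvDiag grid row)[i]]
        = pvWin (pvDiag grid row) limit.toNat (i+1) := by
      rw [hM]; exact pvWin_small _ _ _ (by omega)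
    unfold pvStepB
    simp only [hx, if_neg hLi, apply_ite (f := fun p : Int × Int => p.1),
      apply_ite (f := fun p : Int × Int => p.2), Prod.mk.injEq]
    refine ⟨?_, ?_⟩
    · rw [← pvPnz_append, ← pvZc_append, hM3]
      exact hbest
    · rw [← hM3, pvPnz_append, pvZc_append]
      split_ifs with hx0 <;> rfl

-- the whole loop computes pvBst at the end
theorem pvLoopB (grid : List (List Int)) (limit row : Int) (hl : 1 ≤ limit) :
    ∀ (m i : Nat), i + m = (pvDiag grid row).length →
      (PySem.List.pyRange (i : Int) ((pvDiag grid row).length : Int) 1).foldl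
          (pvStepB limit (pvDiag grid row))
          (pvBst grid limit row (i : Int),
           pvPnz (pvWin (pvDiag grid row) limit.toNat i),
           pvZc (pvWin (pvDiag grid row) limit.toNat i))
        = (pvBst grid limit row (((pvDiag grid row).length : Nat) : Int),
           pvPnz (pvWin (pvDiag grid row) limit.toNat (pvDiag grid row).length),
           pvZc (pvWin (pvDiag grid row) limit.toNat (pvDiag grid row).length)) := by
  intro m
  induction m with
  | zero =>
    intro i h
    rw [PySem.List.pyRange_one_eq_nil (by omega)]
    simp only [List.foldl_nil]
    rw [show i = (pvDiag grid row).length by omega]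
  | succ m ih =>
    intro i h
    rw [PySem.List.pyRange_one_cons (by exact_mod_cast (by omega : i < (pvDiag grid row).length))]
    rw [List.foldl_cons]
    rw [pvStepB_spec grid limit row hl i (by omega)]
    have hc : ((i : Int) + 1) = (((i + 1 : Nat)) : Int) := by push_cast; ring
    rw [hc]
    exact ih (i + 1) (by omega)

-- ===== VERDICT (by name: the statement is the Claim_ definition above) =====
theorem adjacent_product_helper_down_up_spec : Claim_equal_adjacent_product_helper_down_up := by
  intro grid limit row _ hPre
  obtain ⟨hl, -⟩ := hPre
  unfold Spec_adjacent_product_helper_down_up adjacent_product_helper_down_up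
  by_cases hr : row - limit + 1 < 0
  · unfold adjacent_product_helper_down_up_alt
    rw [if_pos hr]
    rcases hf : (row - (row - (row - limit + 1)) + 1).toNat with _ | f
    · rw [pvOuterGo]
    · rw [pvOuterGo, if_neg (by omega)]
  · have hf : (row - (row - (row - limit + 1)) + 1).toNat
        = (row - limit + 1).toNat + 1 := by omega
    rw [hf]
    rw [pvOuterGo_eq grid limit row hl (row - limit + 1).toNat row 0 0 (by omega) (by omega)]
    unfold adjacent_product_helper_down_up_alt
    rw [if_neg hr]
    show _ = ((PySem.List.pyRange 0 (((pvDiag grid row).length : Nat) : Int) 1).foldl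
        (pvStepB limit (pvDiag grid row)) (0, 1, 0)).1
    have h0 : pvBst grid limit row 0 = 0 := by
      unfold pvBst
      rw [PySem.List.pyRange_one_eq_nil (by omega)]
      rfl
    have hw0 : pvWin (pvDiag grid row) limit.toNat 0 = [] := by
      simp [pvWin]
    have := pvLoopB grid limit row hl (pvDiag grid row).length 0 (by omega)
    simp only [Nat.cast_zero] at this
    rw [h0] at this
    rw [hw0] at this
    have hinit : pvPnz ([] : List Int) = 1 ∧ pvZc ([] : List Int) = 0 := by
      constructor <;> rfl
    rw [hinit.1, hinit.2] at this
    rw [this]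
    unfold pvBst
    have hlen : (((pvDiag grid row).length : Nat) : Int) - limit + 1 = row - limit + 2 := by
      rw [pvDiag_length]; omega
    rw [hlen]
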